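-- pv_equiv track=rewrite | github.com/mintutifr/nanoAOD-tools | python/postprocessing/modules/btv/btagSFProducerJson.py | is_relevant_syst_for_shape_corr
-- ===== SOURCE A (Python) =====
-- from itertools import chain
--
-- def is_relevant_syst_for_shape_corr(flavor_btv, syst, jesSystsForShape=["jes"]):
--     """Returns true if a flavor/syst combination is relevant"""
--     jesSysts = list(chain(*[("up_" + j, "down_" + j)
--                             for j in jesSystsForShape]))
--
--     if flavor_btv == 5:
--         return syst in ["central",
--                         "up_lf", "down_lf",
--                         "up_hfstats1", "down_hfstats1",
--                         "up_hfstats2", "down_hfstats2"] + jesSysts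
--     elif flavor_btv == 4:
--         return syst in ["central",
--                         "up_cferr1", "down_cferr1",
--                         "up_cferr2", "down_cferr2"]
--     elif flavor_btv == 0:
--         return syst in ["central",
--                         "up_hf", "down_hf",
--                         "up_lfstats1", "down_lfstats1",
--                         "up_lfstats2", "down_lfstats2"] + jesSysts
--     else:
--         raise ValueError("ERROR: Undefined flavor = %i!!" % flavor_btv)
--     return True
-- ===== SOURCE B (Python) =====
-- def is_relevant_syst_for_shape_corr(flavor_btv, syst, jesSystsForShape=["jes"]):
--     """Returns true if a flavor/syst combination is relevant"""
--     bases = {5: ("lf", "hfstats1", "hfstats2"),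
--              4: ("cferr1", "cferr2"),
--              0: ("hf", "lfstats1", "lfstats2")}
--     if flavor_btv not in bases:
--         raise ValueError("ERROR: Undefined flavor = %i!!" % flavor_btv)
--     if syst == "central":
--         return True
--     for pre in ("up_", "down_"):
--         if syst.startswith(pre):
--             base = syst[len(pre):]
--             return base in bases[flavor_btv] or (flavor_btv != 4 and base in jesSystsForShape)
--     return False
-- ===== Notes on version B (the rewrite author's own statement) =====
-- stated objective: alternative
-- what changed: Instead of materializing the allowed-syst list (chaining up_/down_ jes variants onto per-flavor literals) and testing membership, B parses the syst string itself -- 'central', or an 'up_'/'down_' prefix stripped to a base name -- and checks the base against a small per-flavor base-name table and jesSystsForShape directly, never building the jesSysts list.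
import Mathlib
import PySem

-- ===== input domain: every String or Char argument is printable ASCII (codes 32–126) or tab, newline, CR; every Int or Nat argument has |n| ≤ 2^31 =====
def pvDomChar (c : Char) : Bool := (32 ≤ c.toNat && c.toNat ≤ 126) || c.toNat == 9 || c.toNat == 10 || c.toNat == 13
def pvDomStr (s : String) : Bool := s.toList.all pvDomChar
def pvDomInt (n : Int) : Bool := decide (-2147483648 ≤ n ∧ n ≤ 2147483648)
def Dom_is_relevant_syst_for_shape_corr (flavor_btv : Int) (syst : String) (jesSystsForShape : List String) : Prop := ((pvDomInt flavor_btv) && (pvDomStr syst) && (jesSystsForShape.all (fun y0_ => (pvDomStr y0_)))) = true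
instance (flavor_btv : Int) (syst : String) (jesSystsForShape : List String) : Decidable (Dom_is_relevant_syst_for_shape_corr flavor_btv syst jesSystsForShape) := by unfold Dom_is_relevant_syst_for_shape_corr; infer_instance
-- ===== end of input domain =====

-- B replaces A's build-the-allowed-list-and-test-membership by parsing the syst string
-- ("central" / "up_"+base / "down_"+base) and checking the base name against a small
-- per-flavor base set plus jesSystsForShape directly; same cost, no jesSysts list is built.


-- ===== PORT A =====
-- literal transliteration of A: build jesSysts by chaining (up_, down_) pairs,
-- then if/elif dispatch on the flavor with one membership test per branch.
def is_relevant_syst_for_shape_corr (flavor_btv : Int) (syst : String) (jesSystsForShape : List String) : Bool :=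
  let jesSysts : List String :=
    (jesSystsForShape.map (fun j => ("up_" ++ j, "down_" ++ j))).flatMap
      (fun p => [p.1, p.2])
  if flavor_btv == 5 then
    (["central",
      "up_lf", "down_lf",
      "up_hfstats1", "down_hfstats1",
      "up_hfstats2", "down_hfstats2"] ++ jesSysts).contains syst
  else if flavor_btv == 4 then
    (["central",
      "up_cferr1", "down_cferr1",
      "up_cferr2", "down_cferr2"]).contains syst
  else if flavor_btv == 0 then
    (["central",
      "up_hf", "down_hf",
      "up_lfstats1", "down_lfstats1",
      "up_lfstats2", "down_lfstats2"] ++ jesSysts).contains syst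
  else
    false  -- Python raises ValueError here; excluded by Pre_

-- ===== PORT B =====
-- literal transliteration of B: base-name dict, then parse syst ("central", or the first
-- of the prefixes "up_"/"down_" that matches → strip it and check the base name).
def is_relevant_syst_for_shape_corr_alt (flavor_btv : Int) (syst : String) (jesSystsForShape : List String) : Bool :=
  let bases : PySem.Dict Int (List String) :=
    ((PySem.Dict.empty.insert 5 ["lf", "hfstats1", "hfstats2"]).insert 4
        ["cferr1", "cferr2"]).insert 0 ["hf", "lfstats1", "lfstats2"]
  match bases.get? flavor_btv with
  | none => false   -- Python raises ValueError here; excluded by Pre_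
  | some bs =>
    if syst == "central" then true
    else
      -- 'for pre in ("up_","down_"): if syst.startswith(pre): return …' = first match
      match ["up_", "down_"].find? (fun pre => PySem.Str.startswith syst pre) with
      | some pre =>
          let base := PySem.Str.slice syst (some (PySem.Str.len pre)) none
          bs.contains base || (flavor_btv != 4 && jesSystsForShape.contains base)
      | none => false

-- ===== PRECONDITION & SPEC =====
-- Pre_ excludes exactly the flavors on which A raises ValueError (anything other than 5, 4, 0).
def Pre_is_relevant_syst_for_shape_corr (flavor_btv : Int) (syst : String) (jesSystsForShape : List String) : Prop :=
  flavor_btv = 5 ∨ flavor_btv = 4 ∨ flavor_btv = 0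
instance (flavor_btv : Int) (syst : String) (jesSystsForShape : List String) : Decidable (Pre_is_relevant_syst_for_shape_corr flavor_btv syst jesSystsForShape) := by unfold Pre_is_relevant_syst_for_shape_corr; infer_instance
def pvWitness_is_relevant_syst_for_shape_corr : Int × String × List String := (5, "up_jes", ["jes"])

def Spec_is_relevant_syst_for_shape_corr (flavor_btv : Int) (syst : String) (jesSystsForShape : List String) (out : Bool) : Prop := out = is_relevant_syst_for_shape_corr_alt flavor_btv syst jesSystsForShape
instance (flavor_btv : Int) (syst : String) (jesSystsForShape : List String) (out : Bool) : Decidable (Spec_is_relevant_syst_for_shape_corr flavor_btv syst jesSystsForShape out) := by unfold Spec_is_relevant_syst_for_shape_corr; infer_instance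

-- ===== CLAIM (what is proved, stated in full; the proofs are below) =====
def Claim_equal_is_relevant_syst_for_shape_corr : Prop := ∀ (flavor_btv : Int) (syst : String) (jesSystsForShape : List String), Dom_is_relevant_syst_for_shape_corr flavor_btv syst jesSystsForShape → Pre_is_relevant_syst_for_shape_corr flavor_btv syst jesSystsForShape → Spec_is_relevant_syst_for_shape_corr flavor_btv syst jesSystsForShape (is_relevant_syst_for_shape_corr flavor_btv syst jesSystsForShape)

-- ===== LEMMAS AND PROOFS =====
-- A's itertools.chain comprehension builds the same list as flatMap over up_/down_ pairs.
theorem jes_lists_eq (js : List String) :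
    (js.map (fun j => ("up_" ++ j, "down_" ++ j))).flatMap (fun p => [p.1, p.2])
      = js.flatMap (fun j => ["up_" ++ j, "down_" ++ j]) := by
  induction js with
  | nil => rfl
  | cons h t ih => simp [List.flatMap_cons, ih]

-- parse view of one prefixed membership test: startswith p plus base lookup = "syst is p ++ some element of l"
theorem startswith_and_contains (p syst : String) (l : List String) :
    (PySem.Str.startswith syst p &&
      l.contains (PySem.Str.slice syst (some (PySem.Str.len p)) none))
    = decide (∃ b ∈ l, syst = p ++ b) := by
  cases h : PySem.Str.startswith syst p with
  | false =>
    symm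
    simp only [Bool.false_and, decide_eq_false_iff_not, not_exists, not_and]
    rintro b hb rfl
    have ht : PySem.Chars.startswith (p.toList ++ b.toList) p.toList = true :=
      (PySem.Chars.startswith_iff _ _).mpr ⟨b.toList, rfl⟩
    rw [PySem.Str.startswith_eq, String.toList_append, ht] at h
    cases h
  | true =>
    rw [PySem.Str.startswith_eq, PySem.Chars.startswith_iff] at h
    obtain ⟨t, ht⟩ := h
    have hlen : PySem.Str.len p = (p.toList.length : Int) := by
      simp [PySem.Str.len]
    have hbase : (PySem.Str.slice syst (some (PySem.Str.len p)) none).toList = t := by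
      rw [hlen]
      have : (PySem.Str.slice syst (some ((p.toList.length : Int))) none).toList
          = syst.toList.drop p.toList.length := by simp [pysem]
      rw [this, ← ht, List.drop_left]
    simp only [Bool.true_and, List.contains_eq_mem, decide_eq_decide]
    constructor
    · intro hm
      exact ⟨_, hm, by rw [String.ext_iff, String.toList_append, hbase, ht]⟩
    · rintro ⟨b, hb, rfl⟩
      have hb' : b = PySem.Str.slice (p ++ b) (some (PySem.Str.len p)) none := by
        rw [String.ext_iff, hbase]
        have h2 := ht
        rw [String.toList_append] at h2
        exact (List.append_cancel_left h2.symm)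
      rwa [← hb']

-- the two prefixes are mutually exclusive ('u' ≠ 'd')
theorem not_both_updown (syst : String) (h : PySem.Str.startswith syst "up_" = true) :
    PySem.Str.startswith syst "down_" = false := by
  rw [PySem.Str.startswith_eq, PySem.Chars.startswith_iff] at h
  obtain ⟨t, ht⟩ := h
  cases hd : PySem.Str.startswith syst "down_" with
  | false => rfl
  | true =>
    rw [PySem.Str.startswith_eq, PySem.Chars.startswith_iff] at hd
    obtain ⟨r, hr⟩ := hd
    rw [← ht] at hr
    have e1 : ("up_" : String).toList = ['u','p','_'] := rfl
    have e2 : ("down_" : String).toList = ['d','o','w','n','_'] := rfl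
    rw [e1, e2] at hr
    simp at hr

-- membership in an up_/down_ flatMap list = the two parse tests
theorem flatmap_contains (syst : String) (l : List String) :
    (l.flatMap (fun b => ["up_" ++ b, "down_" ++ b])).contains syst
    = ((PySem.Str.startswith syst "up_" &&
          l.contains (PySem.Str.slice syst (some (PySem.Str.len "up_")) none))
     || (PySem.Str.startswith syst "down_" &&
          l.contains (PySem.Str.slice syst (some (PySem.Str.len "down_")) none))) := by
  rw [startswith_and_contains, startswith_and_contains, List.contains_eq_mem,
    Bool.eq_iff_iff]
  simp only [decide_eq_true_eq, Bool.or_eq_true, List.mem_flatMap, List.mem_cons,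
    List.not_mem_nil, or_false]
  constructor
  · rintro ⟨b, hb, rfl | rfl⟩
    · exact Or.inl ⟨b, hb, rfl⟩
    · exact Or.inr ⟨b, hb, rfl⟩
  · rintro (⟨b, hb, rfl⟩ | ⟨b, hb, rfl⟩)
    · exact ⟨b, hb, Or.inl rfl⟩
    · exact ⟨b, hb, Or.inr rfl⟩

-- one flavor branch: list membership in "central" :: up_/down_ bases (++ jes variants) = B's parse
theorem branch_eq (syst : String) (bsf js : List String) (wj : Bool)
    (hc : (syst == "central") = false) :
    (("central" :: bsf.flatMap (fun b => ["up_" ++ b, "down_" ++ b]))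
        ++ (if wj then js.flatMap (fun j => ["up_" ++ j, "down_" ++ j]) else [])).contains syst
    = (match ["up_", "down_"].find? (fun pre => PySem.Str.startswith syst pre) with
       | some pre =>
           bsf.contains (PySem.Str.slice syst (some (PySem.Str.len pre)) none)
             || (wj && js.contains (PySem.Str.slice syst (some (PySem.Str.len pre)) none))
       | none => false) := by
  rw [List.cons_append, List.contains_cons]
  cases hu : PySem.Str.startswith syst "up_" with
  | true =>
    have hd := not_both_updown syst hu
    simp only [List.find?, hu]
    cases wj with
    | true =>
      rw [List.contains_append, flatmap_contains, if_pos rfl, flatmap_contains]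
      simp at hu hd
      simp [hc, hu, hd]
    | false =>
      simp only [if_neg Bool.false_ne_true, List.append_nil, flatmap_contains]
      simp at hu hd
      simp [hc, hu, hd]
  | false =>
    cases hd : PySem.Str.startswith syst "down_" with
    | true =>
      simp only [List.find?, hu, hd]
      cases wj with
      | true =>
        rw [List.contains_append, flatmap_contains, if_pos rfl, flatmap_contains]
        simp at hu hd
        simp [hc, hu, hd]
      | false =>
        simp only [if_neg Bool.false_ne_true, List.append_nil, flatmap_contains]
        simp at hu hd
        simp [hc, hu, hd]
    | false =>
      simp only [List.find?, hu, hd]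
      cases wj with
      | true =>
        rw [List.contains_append, flatmap_contains, if_pos rfl, flatmap_contains]
        simp at hu hd
        simp [hc, hu, hd]
      | false =>
        simp only [if_neg Bool.false_ne_true, List.append_nil, flatmap_contains]
        simp at hu hd
        simp [hc, hu, hd]

-- ===== VERDICT (by name: the statement is the Claim_ definition above) =====
theorem is_relevant_syst_for_shape_corr_spec : Claim_equal_is_relevant_syst_for_shape_corr := by
  intro flavor_btv syst js _ hpre
  unfold Spec_is_relevant_syst_for_shape_corr
  by_cases hc : syst = "central"
  · subst hc
    rcases hpre with rfl | rfl | rfl <;>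
      simp [is_relevant_syst_for_shape_corr, is_relevant_syst_for_shape_corr_alt,
        PySem.Dict.get?, PySem.Dict.insert, PySem.Dict.empty]
  · have hcb : (syst == "central") = false := by simp [hc]
    rcases hpre with rfl | rfl | rfl
    · have e := branch_eq syst ["lf", "hfstats1", "hfstats2"] js true hcb
      simp only [is_relevant_syst_for_shape_corr, is_relevant_syst_for_shape_corr_alt,
        jes_lists_eq]
      simp [PySem.Dict.get?, PySem.Dict.insert, PySem.Dict.empty, hcb] at e ⊢
      exact e
    · have e := branch_eq syst ["cferr1", "cferr2"] js false hcb
      simp only [is_relevant_syst_for_shape_corr, is_relevant_syst_for_shape_corr_alt,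
        jes_lists_eq]
      simp [PySem.Dict.get?, PySem.Dict.insert, PySem.Dict.empty, hcb] at e ⊢
      exact e
    · have e := branch_eq syst ["hf", "lfstats1", "lfstats2"] js true hcb
      simp only [is_relevant_syst_for_shape_corr, is_relevant_syst_for_shape_corr_alt,
        jes_lists_eq]
      simp [PySem.Dict.get?, PySem.Dict.insert, PySem.Dict.empty, hcb] at e ⊢
      exact e
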